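-- pv_equiv track=rewrite | github.com/MER-GROUP/Python.Kivy | 005 - simple_applications/005 - simple_calc_v3/Parse.py | back_to_operand
-- ===== SOURCE A (Python) =====
-- def back_to_operand(line: str) -> str:
--     index = None
--     i = len(line) - 1
--     while 0 <= i:
--         if line[i] in '+-*/%':
--             index = i
--             break
--         i -= 1
--     if index is None: return line
--     else: return line[: index + 1]
-- ===== SOURCE B (Python) =====
-- def back_to_operand(line: str) -> str:
--     i = max((k for k, ch in enumerate(line) if ch in '+-*/%'), default=-1)
--     return line if i == -1 else line[: i + 1]
-- ===== Notes on version B (the rewrite author's own statement) =====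
-- stated objective: idiomatic
-- what changed: A's backward while-loop with break and a None sentinel is replaced by a one-line forward reduction: max over a generator of operator positions from enumerate (default -1), then one slice.
import Mathlib
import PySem

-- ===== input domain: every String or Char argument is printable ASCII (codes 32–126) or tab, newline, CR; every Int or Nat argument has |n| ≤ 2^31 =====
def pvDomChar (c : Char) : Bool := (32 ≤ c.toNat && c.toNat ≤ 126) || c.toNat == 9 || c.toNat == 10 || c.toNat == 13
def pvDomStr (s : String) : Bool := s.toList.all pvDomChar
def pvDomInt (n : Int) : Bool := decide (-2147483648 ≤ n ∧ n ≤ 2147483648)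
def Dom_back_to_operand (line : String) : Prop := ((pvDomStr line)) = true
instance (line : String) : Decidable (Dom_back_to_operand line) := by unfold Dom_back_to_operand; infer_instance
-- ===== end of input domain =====

-- B replaces A's backward while-loop (break + None sentinel) by a forward
-- max-over-enumerate reduction; objective: idiomatic (same cost).

-- ===== PORT A =====
-- the downward while loop: argument is i+1 (0 means the loop has run out, i = -1);
-- line[i] is always in range here, so getD is exact for Python's indexing
def boLoopA (cs : List Char) : Nat → Option Nat
  | 0 => none
  | n + 1 => if ("+-*/%".toList).contains (cs.getD n ' ') then some n else boLoopA cs n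

def back_to_operand (line : String) : String :=
  let cs := line.toList
  match boLoopA cs cs.length with
  | none => line
  | some index => String.ofList (PySem.List.slice cs none (some ((index : Int) + 1)))

-- ===== PORT B =====
-- the generator expression '(k for k, ch in enumerate(line) if ch in '+-*/%')'
def bIdxs (cs : List Char) : List Int :=
  (PySem.List.enumerate cs).filterMap
    (fun p => if ("+-*/%".toList).contains p.2 then some p.1 else none)

def back_to_operand_alt (line : String) : String :=
  let i : Int := PySem.List.maxD (bIdxs line.toList) (fun x => x) (-1)
  if i = -1 then line else String.ofList (PySem.List.slice line.toList none (some (i + 1)))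

-- ===== PRECONDITION & SPEC =====
def Spec_back_to_operand (line : String) (out : String) : Prop := out = back_to_operand_alt line
instance (line : String) (out : String) : Decidable (Spec_back_to_operand line out) := by unfold Spec_back_to_operand; infer_instance

-- ===== CLAIM (what is proved, stated in full; the proofs are below) =====
def Claim_equal_back_to_operand : Prop := ∀ (line : String), Dom_back_to_operand line → Spec_back_to_operand line (back_to_operand line)

-- ===== LEMMAS AND PROOFS =====

theorem enumerate_append_singleton (cs : List Char) (c : Char) (s : Int) :
    PySem.List.enumerate (cs ++ [c]) s
      = PySem.List.enumerate cs s ++ [(s + cs.length, c)] := by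
  induction cs generalizing s with
  | nil => simp [PySem.List.enumerate]
  | cons x t ih =>
      simp only [List.cons_append, PySem.List.enumerate, ih]
      congr 3
      simp only [List.length_cons, Prod.mk.injEq]
      refine ⟨by push_cast; ring, trivial⟩

theorem enumerate_fst_bound (cs : List Char) (s : Int) :
    ∀ p ∈ PySem.List.enumerate cs s, s ≤ p.1 ∧ p.1 < s + cs.length := by
  induction cs generalizing s with
  | nil => simp [PySem.List.enumerate]
  | cons x t ih =>
      intro p hp
      simp only [PySem.List.enumerate, List.mem_cons] at hp
      rcases hp with h | h
      · subst h; simp only [List.length_cons]; push_cast; omega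
      · have := ih (s + 1) p h
        simp only [List.length_cons]
        push_cast
        omega

theorem boLoopA_append (cs : List Char) (c : Char) :
    ∀ n, n ≤ cs.length → boLoopA (cs ++ [c]) n = boLoopA cs n := by
  intro n
  induction n with
  | zero => intro _; rfl
  | succ m ih =>
      intro h
      have hm : m < cs.length := by omega
      simp only [boLoopA, List.getD_append _ _ _ _ hm, ih (by omega)]

theorem getD_append_at_length (cs : List Char) (c : Char) :
    (cs ++ [c]).getD cs.length ' ' = c := by
  simp [List.getD_eq_getElem?_getD]

theorem bIdxs_bound (cs : List Char) :
    ∀ x ∈ bIdxs cs, 0 ≤ x ∧ x < cs.length := by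
  intro x hx
  simp only [bIdxs, List.mem_filterMap] at hx
  rcases hx with ⟨p, hp, hpx⟩
  have := enumerate_fst_bound cs 0 p hp
  split at hpx
  · cases hpx; omega
  · cases hpx

theorem bIdxs_append (cs : List Char) (c : Char) :
    bIdxs (cs ++ [c])
      = bIdxs cs ++ (if ("+-*/%".toList).contains c then [(cs.length : Int)] else []) := by
  simp only [bIdxs]
  rw [enumerate_append_singleton, List.filterMap_append]
  congr 1
  split <;> simp_all

theorem core_idx (cs : List Char) :
    (match boLoopA cs cs.length with | none => (-1 : Int) | some j => (j : Int))
      = (bIdxs cs).foldl max (-1) := by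
  induction cs using List.reverseRecOn with
  | nil => simp [boLoopA, bIdxs, PySem.List.enumerate]
  | append_singleton t c ih =>
      have hlen : (t ++ [c]).length = t.length + 1 := by simp
      rw [hlen, bIdxs_append, List.foldl_append]
      simp only [boLoopA, getD_append_at_length, boLoopA_append t c t.length (le_refl _)]
      by_cases hc : ("+-*/%".toList).contains c = true
      · simp only [hc, if_true, List.foldl_cons, List.foldl_nil]
        have hub : (bIdxs t).foldl max (-1) ≤ (t.length : Int) := by
          rcases PySem.List.foldl_max_mem (bIdxs t) (-1) with h | h
          · omega
          · have := (bIdxs_bound t _ h).2; omega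
        omega
      · simp only [hc]
        exact ih

theorem maxD_id_eq_foldl (l : List Int) (d : Int) (h : ∀ y ∈ l, d ≤ y) :
    PySem.List.maxD l (fun x => x) d = l.foldl max d := by
  cases l with
  | nil => simp [PySem.List.maxD, PySem.List.max?]
  | cons x t =>
      have hx : max d x = x := max_eq_right (h x (by simp))
      simp only [PySem.List.maxD, PySem.List.max?_id_cons, Option.getD_some,
        List.foldl_cons, hx]

-- ===== VERDICT (by name: the statement is the Claim_ definition above) =====
theorem back_to_operand_spec : Claim_equal_back_to_operand := by
  intro line _
  unfold Spec_back_to_operand back_to_operand back_to_operand_alt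
  have hmax : PySem.List.maxD (bIdxs line.toList) (fun x => x) (-1)
      = (bIdxs line.toList).foldl max (-1) :=
    maxD_id_eq_foldl _ _ (fun y hy => by have := (bIdxs_bound _ y hy).1; omega)
  rw [hmax, ← core_idx]
  dsimp only
  cases hb : boLoopA line.toList line.toList.length with
  | none => simp
  | some j =>
      have hne : ¬ ((j : Int) = -1) := by omega
      simp [hne]
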